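-- pv_equiv track=rewrite | github.com/eliwchen/CVRPTW_geatpy | MyFunction.py | Ind2Chroms
-- ===== SOURCE A (Python) =====
-- def Ind2Chroms(vehicle_routing):
--     Chrom1=[i for i in vehicle_routing if i !=0]
--     Chrom2=[]
--     indx=0
--     for i in vehicle_routing:
--         if i==0:
--             indx+=1
--         else:
--             Chrom2.append(indx)
--     Chroms=[Chrom1,Chrom2]
--     return Chroms
-- ===== SOURCE B (Python) =====
-- def Ind2Chroms(vehicle_routing):
--     # split the routing into zero-separated segments, then flatten
--     segments = [[]]
--     for x in vehicle_routing:
--         if x == 0: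
--             segments.append([])
--         else:
--             segments[-1].append(x)
--     chrom1 = []
--     chrom2 = []
--     for k, seg in enumerate(segments):
--         chrom1 += seg
--         chrom2 += [k] * len(seg)
--     return [chrom1, chrom2]
-- ===== Notes on version B (the rewrite author's own statement) =====
-- stated objective: alternative
-- what changed: B splits the routing into zero-separated segments first, then flattens the segments into Chrom1 and emits each segment's index repeated len(segment) times into Chrom2, instead of A's filter pass plus counter-tracking loop.
import Mathlib
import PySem

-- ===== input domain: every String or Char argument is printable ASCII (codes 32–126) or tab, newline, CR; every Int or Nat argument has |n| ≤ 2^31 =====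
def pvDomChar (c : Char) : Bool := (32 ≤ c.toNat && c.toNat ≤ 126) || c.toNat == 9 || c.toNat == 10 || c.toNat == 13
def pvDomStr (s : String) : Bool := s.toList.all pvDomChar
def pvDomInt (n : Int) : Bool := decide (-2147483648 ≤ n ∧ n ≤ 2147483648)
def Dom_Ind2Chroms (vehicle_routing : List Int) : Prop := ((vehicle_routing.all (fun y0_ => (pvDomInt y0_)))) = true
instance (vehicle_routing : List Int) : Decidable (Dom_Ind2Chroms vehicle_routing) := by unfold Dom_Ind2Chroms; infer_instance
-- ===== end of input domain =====

-- B splits into zero-separated segments, then flattens; same O(n) task, different decomposition.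

-- ===== PORT A =====
def Ind2Chroms (vehicle_routing : List Int) : List (List Int) :=
  -- Chrom1 = [i for i in vehicle_routing if i != 0]
  let chrom1 := vehicle_routing.filter (fun i => i ≠ 0)
  -- indx = 0; for i in …: if i == 0: indx += 1 else: Chrom2.append(indx)
  let st := vehicle_routing.foldl
    (fun (st : Int × List Int) i =>
      if i = 0 then (st.1 + 1, st.2) else (st.1, st.2 ++ [st.1]))
    (0, [])
  [chrom1, st.2]

-- ===== PORT B =====
-- one step of Source B's first loop: start a new segment on 0, else append to the last one
def pvSegStep (segs : List (List Int)) (x : Int) : List (List Int) :=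
  if x = 0 then segs ++ [[]] else segs.dropLast ++ [segs.getLast! ++ [x]]

def Ind2Chroms_alt (vehicle_routing : List Int) : List (List Int) :=
  let segments := vehicle_routing.foldl pvSegStep [[]]
  -- for k, seg in enumerate(segments): chrom1 += seg; chrom2 += [k]*len(seg)
  let st := segments.zipIdx.foldl
    (fun (st : List Int × List Int) p =>
      (st.1 ++ p.1, st.2 ++ List.replicate p.1.length (Int.ofNat p.2)))
    ([], [])
  [st.1, st.2]

-- ===== PRECONDITION & SPEC =====
def Spec_Ind2Chroms (vehicle_routing : List Int) (out : List (List Int)) : Prop := out = Ind2Chroms_alt vehicle_routing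
instance (vehicle_routing : List Int) (out : List (List Int)) : Decidable (Spec_Ind2Chroms vehicle_routing out) := by unfold Spec_Ind2Chroms; infer_instance

-- ===== CLAIM (what is proved, stated in full; the proofs are below) =====
def Claim_equal_Ind2Chroms : Prop := ∀ (vehicle_routing : List Int), Dom_Ind2Chroms vehicle_routing → Spec_Ind2Chroms vehicle_routing (Ind2Chroms vehicle_routing)

-- ===== LEMMAS AND PROOFS =====

-- reference recursion for Source B's first loop: current open segment cur, rest of the input
def segsFrom (cur : List Int) : List Int → List (List Int)
  | [] => [cur]
  | x :: xs => if x = 0 then cur :: segsFrom [] xs else segsFrom (cur ++ [x]) xs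

-- reference recursion for A's Chrom2 loop, starting index k
def gSpec : List Int → Int → List Int
  | [], _ => []
  | x :: xs, k => if x = 0 then gSpec xs (k + 1) else k :: gSpec xs k

-- reference recursion for Source B's second loop (segments → (chrom1, chrom2)), starting index k
def fSpec : List (List Int) → Int → List Int × List Int
  | [], _ => ([], [])
  | s :: ss, k => (s ++ (fSpec ss (k + 1)).1, (List.replicate s.length k) ++ (fSpec ss (k + 1)).2)

theorem segStep_foldl (v : List Int) : ∀ (ss : List (List Int)) (cur : List Int),
    v.foldl pvSegStep (ss ++ [cur]) = ss ++ segsFrom cur v := by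
  induction v with
  | nil => intro ss cur; simp [segsFrom]
  | cons x xs ih =>
    intro ss cur
    by_cases hx : x = 0
    · have h1 : pvSegStep (ss ++ [cur]) x = (ss ++ [cur]) ++ [[]] := by
        simp [pvSegStep, hx]
      rw [List.foldl_cons, h1,
        show segsFrom cur (x :: xs) = cur :: segsFrom [] xs from by simp [segsFrom, hx]]
      exact (ih (ss ++ [cur]) []).trans (by simp)
    · have h1 : pvSegStep (ss ++ [cur]) x = ss ++ [cur ++ [x]] := by
        simp [pvSegStep, hx]
      rw [List.foldl_cons, h1,
        show segsFrom cur (x :: xs) = segsFrom (cur ++ [x]) xs from by simp [segsFrom, hx]]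
      exact ih ss (cur ++ [x])
  
theorem zipIdx_foldl (ss : List (List Int)) : ∀ (n : Nat) (a b : List Int),
    (ss.zipIdx n).foldl
      (fun (st : List Int × List Int) p =>
        (st.1 ++ p.1, st.2 ++ List.replicate p.1.length (Int.ofNat p.2)))
      (a, b)
    = (a ++ (fSpec ss (Int.ofNat n)).1, b ++ (fSpec ss (Int.ofNat n)).2) := by
  induction ss with
  | nil => intro n a b; simp [fSpec]
  | cons s rest ih =>
    intro n a b
    rw [List.zipIdx_cons, List.foldl_cons]
    have := ih (n + 1) (a ++ s) (b ++ List.replicate s.length (Int.ofNat n))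
    simp only [this]
    have hcast : Int.ofNat (n + 1) = Int.ofNat n + 1 := rfl
    rw [hcast]
    simp [fSpec, List.append_assoc]

theorem fSpec_segsFrom (v : List Int) : ∀ (cur : List Int) (k : Int),
    fSpec (segsFrom cur v) k
      = (cur ++ v.filter (fun i => i ≠ 0), List.replicate cur.length k ++ gSpec v k) := by
  induction v with
  | nil => intro cur k; simp [segsFrom, fSpec, gSpec]
  | cons x xs ih =>
    intro cur k
    by_cases hx : x = 0
    · rw [show segsFrom cur (x :: xs) = cur :: segsFrom [] xs from by simp [segsFrom, hx]]
      simp only [fSpec, ih [] (k + 1)]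
      simp [gSpec, hx]
    · rw [show segsFrom cur (x :: xs) = segsFrom (cur ++ [x]) xs from by simp [segsFrom, hx],
        ih (cur ++ [x]) k]
      simp [gSpec, hx, List.append_assoc]
      rw [List.replicate_succ']
      simp

theorem a_loop (v : List Int) : ∀ (n : Int) (acc : List Int),
    (v.foldl (fun (st : Int × List Int) i =>
        if i = 0 then (st.1 + 1, st.2) else (st.1, st.2 ++ [st.1])) (n, acc)).2
      = acc ++ gSpec v n := by
  induction v with
  | nil => intro n acc; simp [gSpec]
  | cons x xs ih =>
    intro n acc
    by_cases hx : x = 0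
    · simp [hx, gSpec, ih]
    · simp [hx, gSpec, ih, List.append_assoc]

-- ===== VERDICT (by name: the statement is the Claim_ definition above) =====
theorem Ind2Chroms_spec : Claim_equal_Ind2Chroms := by
  intro v _
  show Ind2Chroms v = Ind2Chroms_alt v
  have hsegs : v.foldl pvSegStep [[]] = segsFrom [] v := by
    simpa using segStep_foldl v [] []
  have hf := fSpec_segsFrom v [] 0
  simp only [List.nil_append, List.length_nil, List.replicate_zero] at hf
  simp only [Ind2Chroms, Ind2Chroms_alt, hsegs, zipIdx_foldl (segsFrom [] v) 0 [] [],
    a_loop v 0 []]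
  simp [hf]
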